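-- pv_equiv track=rewrite | github.com/pypi-data/pypi-mirror-392 | packages/cloudx-proxy/cloudx_proxy-0.9.6-py3-none-any.whl/cloudx_proxy/setup.py | _extract_host_config
-- ===== SOURCE A (Python) =====
-- from typing import Optional, Tuple
--
-- def _extract_host_config(pattern: str, current_config: str) -> Tuple[str, str]:
--     """Extract a host configuration block from the current config.
--
--     Args:
--         pattern: Host pattern to extract (e.g., 'cloudx-*', 'cloudx-dev-*')
--         current_config: Current SSH config content
--
--     Returns:
--         Tuple[str, str]: Extracted host configuration, remaining configuration
--     """
--     lines = current_config.splitlines()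
--     host_config_lines = []
--     remaining_lines = []
--     in_host_block = False
--
--     for line in lines:
--         if line.strip() == f"Host {pattern}":
--             in_host_block = True
--             host_config_lines.append(line)
--         elif in_host_block and line.strip().startswith("Host "):
--             in_host_block = False
--             remaining_lines.append(line)
--         elif in_host_block:
--             host_config_lines.append(line)
--         else:
--             remaining_lines.append(line)
--
--     return "\n".join(host_config_lines), "\n".join(remaining_lines)
-- ===== SOURCE B (Python) =====
-- def _block_matches(header, block):
--     return bool(block) and block[0].strip() == header
--
--
-- def _extract_host_config(pattern: str, current_config: str):
--     """Segment the config into blocks starting at 'Host ' lines, then classify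
--     each block as the matching host block or remaining config."""
--     header = f"Host {pattern}"
--     blocks = []
--     cur = []
--     for line in current_config.splitlines():
--         if line.strip().startswith("Host "):
--             blocks.append(cur)
--             cur = [line]
--         else:
--             cur.append(line)
--     blocks.append(cur)
--     host_config_lines = []
--     remaining_lines = []
--     for block in blocks:
--         if _block_matches(header, block):
--             host_config_lines.extend(block)
--         else:
--             remaining_lines.extend(block)
--     return "\n".join(host_config_lines), "\n".join(remaining_lines)
-- ===== Notes on version B (the rewrite author's own statement) =====
-- stated objective: alternative
-- what changed: Replaces A's in_host_block flag state machine (one pass deciding line-by-line) with a segment-then-classify structure: a first pass splits the lines into blocks at 'Host '-starting lines, a second pass routes each whole block to host or remaining by its header line.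
import Mathlib
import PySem

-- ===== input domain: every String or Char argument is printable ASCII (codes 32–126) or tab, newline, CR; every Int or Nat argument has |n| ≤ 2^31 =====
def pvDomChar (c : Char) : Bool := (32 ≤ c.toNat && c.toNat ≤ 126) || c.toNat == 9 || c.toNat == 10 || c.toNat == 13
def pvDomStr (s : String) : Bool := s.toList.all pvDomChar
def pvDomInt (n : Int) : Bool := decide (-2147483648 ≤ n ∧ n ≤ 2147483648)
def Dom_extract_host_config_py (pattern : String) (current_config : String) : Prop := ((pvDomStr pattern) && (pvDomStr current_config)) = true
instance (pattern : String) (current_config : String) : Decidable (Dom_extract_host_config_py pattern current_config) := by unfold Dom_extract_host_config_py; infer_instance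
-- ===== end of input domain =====

-- B replaces A's in_host_block flag state machine by a segment-into-blocks pass followed by a
-- classify-blocks pass (objective: alternative decomposition, same cost).

-- ===== PORT A =====
-- loop body of A's single for-loop, on state (host_config_lines, remaining_lines, in_host_block)
def pvAstep (pattern : String) (st : List String × List String × Bool) (line : String) :
    List String × List String × Bool :=
  if PySem.Str.strip line == "Host " ++ pattern then (st.1 ++ [line], st.2.1, true)
  else if st.2.2 && PySem.Str.startswith (PySem.Str.strip line) "Host " then
    (st.1, st.2.1 ++ [line], false)
  else if st.2.2 then (st.1 ++ [line], st.2.1, st.2.2)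
  else (st.1, st.2.1 ++ [line], st.2.2)

def extract_host_config_py (pattern : String) (current_config : String) : String × String :=
  let lines := PySem.Str.splitlines current_config
  let st := lines.foldl (pvAstep pattern) ([], [], false)
  (PySem.Str.join "\n" st.1, PySem.Str.join "\n" st.2.1)

-- ===== PORT B =====
-- loop body of B's first (segmentation) loop, on state (blocks, cur)
def pvBseg (st : List (List String) × List String) (line : String) :
    List (List String) × List String :=
  if PySem.Str.startswith (PySem.Str.strip line) "Host " then (st.1 ++ [st.2], [line])
  else (st.1, st.2 ++ [line])

-- B's helper _block_matches
def pvBlockMatches (header : String) (block : List String) : Bool :=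
  match block with
  | [] => false
  | first :: _ => PySem.Str.strip first == header

-- loop body of B's second (classification) loop, on state (host_config_lines, remaining_lines)
def pvBcls (header : String) (st : List String × List String) (block : List String) :
    List String × List String :=
  if pvBlockMatches header block then (st.1 ++ block, st.2) else (st.1, st.2 ++ block)

def extract_host_config_py_alt (pattern : String) (current_config : String) : String × String :=
  let header := "Host " ++ pattern
  let seg := (PySem.Str.splitlines current_config).foldl pvBseg ([], [])
  let blocks := seg.1 ++ [seg.2]
  let out := blocks.foldl (pvBcls header) ([], [])
  (PySem.Str.join "\n" out.1, PySem.Str.join "\n" out.2)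

-- ===== PRECONDITION & SPEC =====
def Spec_extract_host_config_py (pattern : String) (current_config : String) (out : String × String) : Prop := out = extract_host_config_py_alt pattern current_config
instance (pattern : String) (current_config : String) (out : String × String) : Decidable (Spec_extract_host_config_py pattern current_config out) := by unfold Spec_extract_host_config_py; infer_instance

-- ===== CLAIM (what is proved, stated in full; the proofs are below) =====
def Claim_equal_extract_host_config_py : Prop := ∀ (pattern : String) (current_config : String), Dom_extract_host_config_py pattern current_config → Spec_extract_host_config_py pattern current_config (extract_host_config_py pattern current_config)

-- ===== LEMMAS AND PROOFS =====

-- a line whose strip equals the header also strip-starts with "Host "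
lemma strip_eq_header_startswith (pattern s : String)
    (h : (PySem.Str.strip s == "Host " ++ pattern) = true) :
    PySem.Str.startswith (PySem.Str.strip s) "Host " = true := by
  rw [beq_iff_eq] at h
  rw [h]
  simp [PySem.Str.startswith_eq, String.toList_append, PySem.Chars.startswith_iff]

-- the blocks accumulator of the segmentation fold is only ever appended to
lemma seg_blocks_prefix (lines : List String) :
    ∀ (bs : List (List String)) (cur : List String),
      lines.foldl pvBseg (bs, cur)
        = (bs ++ (lines.foldl pvBseg ([], cur)).1, (lines.foldl pvBseg ([], cur)).2) := by
  induction lines with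
  | nil => intro bs cur; simp
  | cons l ls ih =>
    intro bs cur
    simp only [List.foldl_cons, pvBseg]
    by_cases hs : PySem.Str.startswith (PySem.Str.strip l) "Host " = true
    · simp only [hs, if_pos, List.nil_append]
      rw [ih (bs ++ [cur]) [l], ih [cur] [l]]
      simp
    · simp only [hs, Bool.false_eq_true, if_neg, not_false_iff]
      exact ih bs (cur ++ [l])

-- main invariant: classifying the segmentation of the remaining lines (with open block cur)
-- equals A's fold started from the state in which cur's lines are already distributed.
lemma main_inv (pattern : String) (lines : List String) :
    ∀ (cur : List String) (h r : List String),
      ((((lines.foldl pvBseg ([], cur)).1 ++ [(lines.foldl pvBseg ([], cur)).2]).foldl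
          (pvBcls ("Host " ++ pattern)) (h, r)))
        = ((lines.foldl (pvAstep pattern)
              (h ++ (if pvBlockMatches ("Host " ++ pattern) cur then cur else []),
               r ++ (if pvBlockMatches ("Host " ++ pattern) cur then [] else cur),
               pvBlockMatches ("Host " ++ pattern) cur)).1,
           (lines.foldl (pvAstep pattern)
              (h ++ (if pvBlockMatches ("Host " ++ pattern) cur then cur else []),
               r ++ (if pvBlockMatches ("Host " ++ pattern) cur then [] else cur),
               pvBlockMatches ("Host " ++ pattern) cur)).2.1) := by
  induction lines with
  | nil =>
    intro cur h r
    by_cases hm : pvBlockMatches ("Host " ++ pattern) cur = true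
    · simp [pvBcls, hm]
    · simp [pvBcls, hm]
  | cons l ls ih =>
    intro cur h r
    by_cases he : (PySem.Str.strip l == "Host " ++ pattern) = true
    · -- matching header: closes cur, opens a matching block [l]
      have hs := strip_eq_header_startswith pattern l he
      simp only [List.foldl_cons, pvBseg, pvAstep, hs, he, if_pos, List.nil_append]
      rw [seg_blocks_prefix ls [cur] [l]]
      have : ([cur] ++ (ls.foldl pvBseg ([], [l])).1) ++ [(ls.foldl pvBseg ([], [l])).2]
          = [cur] ++ ((ls.foldl pvBseg ([], [l])).1 ++ [(ls.foldl pvBseg ([], [l])).2]) := by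
        simp
      rw [this, List.foldl_append]
      rw [ih [l]]
      have hml : pvBlockMatches ("Host " ++ pattern) [l] = true := by
        simpa [pvBlockMatches] using he
      by_cases hm : pvBlockMatches ("Host " ++ pattern) cur = true
      · simp [pvBcls, hm, hml]
      · simp [pvBcls, hm, hml]
    · by_cases hs : PySem.Str.startswith (PySem.Str.strip l) "Host " = true
      · -- non-matching Host line: closes cur, opens a non-matching block [l]
        simp only [List.foldl_cons, pvBseg, pvAstep, hs, he, Bool.false_eq_true,
          if_pos, if_neg, not_false_iff, List.nil_append]
        rw [seg_blocks_prefix ls [cur] [l]]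
        have : ([cur] ++ (ls.foldl pvBseg ([], [l])).1) ++ [(ls.foldl pvBseg ([], [l])).2]
            = [cur] ++ ((ls.foldl pvBseg ([], [l])).1 ++ [(ls.foldl pvBseg ([], [l])).2]) := by
          simp
        rw [this, List.foldl_append]
        rw [ih [l]]
        have hml : pvBlockMatches ("Host " ++ pattern) [l] = false := by
          simp [pvBlockMatches, he]
        by_cases hm : pvBlockMatches ("Host " ++ pattern) cur = true
        · simp [pvBcls, hm, hml]
        · simp [pvBcls, hm, hml]
      · -- ordinary line: extends cur
        simp only [List.foldl_cons, pvBseg, pvAstep, hs, he, Bool.false_eq_true,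
          if_neg, not_false_iff]
        rw [ih (cur ++ [l])]
        have hmm : pvBlockMatches ("Host " ++ pattern) (cur ++ [l])
            = pvBlockMatches ("Host " ++ pattern) cur := by
          cases cur with
          | nil => simp [pvBlockMatches, he]
          | cons f t => simp [pvBlockMatches]
        rw [hmm]
        by_cases hm : pvBlockMatches ("Host " ++ pattern) cur = true
        · simp [hm]
        · simp [hm]


-- ===== VERDICT (by name: the statement is the Claim_ definition above) =====
theorem extract_host_config_py_spec : Claim_equal_extract_host_config_py := by
  intro pattern current_config _
  have h := main_inv pattern (PySem.Str.splitlines current_config) [] [] []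
  simp only [pvBlockMatches, Bool.false_eq_true, if_neg, not_false_iff, List.append_nil] at h
  simp only [Spec_extract_host_config_py, extract_host_config_py, extract_host_config_py_alt]
  rw [h]
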